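-- pv_equiv track=rewrite | github.com/JeremyDaug/Silly-Side-Stuff | DraconicDictionary/syls.py | dup_affixes
-- ===== SOURCE A (Python) =====
-- WordAffixOrder = ['Grammar Affix', 'Prepositional Flag', 'Prepositional/Clause Affix',
--                   'Factuality Affix', 'Negative Affix',
--                   'Intensity Affix', 'Progressive Affix', 'Root',
--                   'Recurrence Affix', 'Temporal Affix', 'Numeric Affix',
--                   'Gender Affix']
--
-- def dup_affixes(tagOrder):
--     rootord = WordAffixOrder.index('Root')
--     seen = set()
--     for i in tagOrder:
--         if i == rootord:
--             continue
--         elif i in seen: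
--             return True
--         seen.add(i)
--     return False
-- ===== SOURCE B (Python) =====
-- WordAffixOrder = ['Grammar Affix', 'Prepositional Flag', 'Prepositional/Clause Affix',
--                   'Factuality Affix', 'Negative Affix',
--                   'Intensity Affix', 'Progressive Affix', 'Root',
--                   'Recurrence Affix', 'Temporal Affix', 'Numeric Affix',
--                   'Gender Affix']
--
-- def dup_affixes(tagOrder):
--     rootord = WordAffixOrder.index('Root')
--     vals = sorted(v for v in tagOrder if v != rootord)
--     return any(a == b for a, b in zip(vals, vals[1:]))
-- ===== Notes on version B (the rewrite author's own statement) =====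
-- stated objective: alternative
-- what changed: Replaces the hash-set membership loop with a sort of the non-Root tag values followed by a single adjacent-equality scan.
import Mathlib
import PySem

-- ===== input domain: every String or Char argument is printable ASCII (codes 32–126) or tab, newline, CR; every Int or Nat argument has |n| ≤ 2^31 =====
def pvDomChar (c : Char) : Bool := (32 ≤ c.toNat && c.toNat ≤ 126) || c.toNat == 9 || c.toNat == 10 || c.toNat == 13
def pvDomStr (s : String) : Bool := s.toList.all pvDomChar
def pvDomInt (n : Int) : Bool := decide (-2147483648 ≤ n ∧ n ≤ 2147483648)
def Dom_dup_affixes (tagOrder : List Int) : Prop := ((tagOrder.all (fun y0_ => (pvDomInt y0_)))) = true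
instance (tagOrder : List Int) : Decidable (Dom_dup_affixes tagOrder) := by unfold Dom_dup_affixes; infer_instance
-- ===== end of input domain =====

-- B replaces A's seen-set loop by sorting the non-Root values and scanning once for an adjacent equal pair; return values proved equal on all inputs.

-- ===== PORT A =====
def pvWordAffixOrder : List String :=
  ["Grammar Affix", "Prepositional Flag", "Prepositional/Clause Affix",
   "Factuality Affix", "Negative Affix",
   "Intensity Affix", "Progressive Affix", "Root",
   "Recurrence Affix", "Temporal Affix", "Numeric Affix",
   "Gender Affix"]

-- 'Root' is present in pvWordAffixOrder, so Python's .index never raises; .getD 0 is never the default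
def pvRootord : Int := ((PySem.List.index? pvWordAffixOrder "Root").getD 0 : Nat)

def dupLoopA (rootord : Int) (seen : PySem.Set Int) : List Int → Bool
  | [] => false
  | i :: rest =>
    if i == rootord then dupLoopA rootord seen rest
    else if PySem.Set.contains seen i then true
    else dupLoopA rootord (PySem.Set.add seen i) rest

def dup_affixes (tagOrder : List Int) : Bool :=
  dupLoopA pvRootord PySem.Set.empty tagOrder

-- ===== PORT B =====
-- any(a == b for a, b in zip(vals, vals[1:]))
def adjDup : List Int → Bool
  | a :: b :: rest => a == b || adjDup (b :: rest)
  | _ => false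

def dup_affixes_alt (tagOrder : List Int) : Bool :=
  adjDup (PySem.List.sorted (tagOrder.filter (fun v => v != pvRootord)) (fun x => x) false)

-- ===== PRECONDITION & SPEC =====
def Spec_dup_affixes (tagOrder : List Int) (out : Bool) : Prop := out = dup_affixes_alt tagOrder
instance (tagOrder : List Int) (out : Bool) : Decidable (Spec_dup_affixes tagOrder out) := by unfold Spec_dup_affixes; infer_instance

-- ===== CLAIM (what is proved, stated in full; the proofs are below) =====
def Claim_equal_dup_affixes : Prop := ∀ (tagOrder : List Int), Dom_dup_affixes tagOrder → Spec_dup_affixes tagOrder (dup_affixes tagOrder)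

-- ===== LEMMAS AND PROOFS =====

-- A's loop decides whether the seen set together with the non-Root values contains a repeat.
theorem dupLoopA_eq (r : Int) (xs : List Int) : ∀ (seen : PySem.Set Int), seen.Nodup →
    dupLoopA r seen xs = !decide (seen ++ xs.filter (fun v => v != r)).Nodup := by
  induction xs with
  | nil => intro seen hs; simp [dupLoopA, hs]
  | cons i rest ih =>
    intro seen hs
    by_cases hir : i = r
    · simp [dupLoopA, hir, ih seen hs]
    · have hfil : (i :: rest).filter (fun v => v != r) =
          i :: rest.filter (fun v => v != r) := by simp [hir]
      by_cases hmem : i ∈ seen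
      · have hdup : ¬ (seen ++ i :: rest.filter (fun v => v != r)).Nodup := fun hnd =>
          (List.disjoint_of_nodup_append hnd) hmem List.mem_cons_self
        simp [dupLoopA, hir, hmem, hfil, hdup]
      · have hadd : PySem.Set.add seen i = seen ++ [i] := by
          simp [PySem.Set.add, hmem]
        have hnd' : (seen ++ [i]).Nodup := by
          simp only [List.nodup_append, List.nodup_cons]
          exact ⟨hs, by simp, fun a ha => by simp; exact fun h => hmem (h ▸ ha)⟩
        have hrec := ih (seen ++ [i]) hnd'
        rw [List.append_assoc] at hrec
        have hc : PySem.Set.contains seen i = false := by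
          simp [hmem]
        simp only [dupLoopA, beq_iff_eq, if_neg hir, hc, Bool.false_eq_true, if_false]
        rw [hadd, hrec, hfil]
        simp

-- adjacent-equality scan on a (≤)-sorted list decides Nodup
theorem adjDup_of_pairwise (l : List Int) (h : l.Pairwise (· ≤ ·)) :
    adjDup l = !decide l.Nodup := by
  induction l with
  | nil => simp [adjDup]
  | cons a t ih =>
    cases t with
    | nil => simp [adjDup]
    | cons b rest =>
      by_cases hab : a = b
      · have : ¬ (a :: b :: rest).Nodup := by
          intro hnd; exact (List.nodup_cons.mp hnd).1 (hab ▸ List.mem_cons_self)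
        simp [adjDup, hab]
      · have hnotmem : a ∉ b :: rest := by
          intro hmem
          have hab' : a ≤ b := (List.pairwise_cons.mp h).1 b List.mem_cons_self
          rcases List.mem_cons.mp hmem with h1 | h1
          · exact hab h1
          · have hba : b ≤ a := (List.pairwise_cons.mp (List.pairwise_cons.mp h).2).1 a h1
            exact hab (le_antisymm hab' hba)
        have ihres := ih (List.pairwise_cons.mp h).2
        have : (a :: b :: rest).Nodup ↔ (b :: rest).Nodup := by
          constructor
          · exact fun hnd => (List.nodup_cons.mp hnd).2
          · exact fun hnd => List.nodup_cons.mpr ⟨hnotmem, hnd⟩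
        simp [adjDup, hab, ihres, this]

theorem filter_nodup_iff_sorted (ys : List Int) :
    (PySem.List.sorted ys (fun x => x) false).Nodup ↔ ys.Nodup :=
  (PySem.List.sorted_perm ys (fun x => x) false).nodup_iff

-- ===== VERDICT (by name: the statement is the Claim_ definition above) =====
theorem dup_affixes_spec : Claim_equal_dup_affixes := by
  intro tagOrder _
  unfold Spec_dup_affixes dup_affixes dup_affixes_alt
  rw [dupLoopA_eq pvRootord tagOrder PySem.Set.empty (by simp [PySem.Set.empty]),
      adjDup_of_pairwise _ (PySem.List.sorted_pairwise _ _)]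
  simp [PySem.Set.empty, filter_nodup_iff_sorted]
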